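-- pv_equiv track=rewrite | github.com/nini1972/mars-colonization-specialist | src/mars_agent/dashboard_app.py | _latest_correlated_identifier
-- ===== SOURCE A (Python) =====
-- from collections.abc import AsyncIterator, Mapping
--
-- def _latest_correlated_identifier(
--     index: Mapping[str, str],
--     correlation_id: str,
-- ) -> str | None:
--     matches = sorted(identifier for identifier, mapped in index.items() if mapped == correlation_id)
--     if not matches:
--         return None
--     return matches[-1]
-- ===== SOURCE B (Python) =====
-- def _latest_correlated_identifier(index, correlation_id):
--     best = None
--     for identifier, mapped in index.items():
--         if mapped == correlation_id:
--             if best is None or best < identifier: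
--                 best = identifier
--     return best
-- ===== Notes on version B (the rewrite author's own statement) =====
-- stated objective: simpler
-- what changed: Replaces build-filtered-list + sort + take-last with a single running-max scan over the items, keeping only the current best identifier.
import Mathlib
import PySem

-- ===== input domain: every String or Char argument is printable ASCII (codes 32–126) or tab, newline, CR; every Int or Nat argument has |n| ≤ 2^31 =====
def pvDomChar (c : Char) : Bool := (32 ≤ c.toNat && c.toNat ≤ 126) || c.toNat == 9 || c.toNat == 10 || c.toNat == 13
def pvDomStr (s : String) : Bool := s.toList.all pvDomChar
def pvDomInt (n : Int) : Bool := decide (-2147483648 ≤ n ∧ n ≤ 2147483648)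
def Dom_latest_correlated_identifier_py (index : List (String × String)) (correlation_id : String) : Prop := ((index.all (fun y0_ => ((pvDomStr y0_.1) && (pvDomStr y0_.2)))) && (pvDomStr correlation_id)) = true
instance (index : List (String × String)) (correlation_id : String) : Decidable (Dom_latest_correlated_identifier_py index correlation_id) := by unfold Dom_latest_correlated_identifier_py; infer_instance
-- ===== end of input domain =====

-- B replaces A's build-filtered-list + sort + take-last with a single running-max scan (simpler, no intermediate sorted list).

-- ===== PORT A =====
-- matches = sorted(identifier for identifier, mapped in index.items() if mapped == correlation_id)
-- if not matches: return None ; return matches[-1]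
def latest_correlated_identifier_py (index : List (String × String)) (correlation_id : String) : Option String :=
  let ms := PySem.List.sorted ((index.filter (fun p => p.2 == correlation_id)).map Prod.fst) (fun x => x) false
  if ms = [] then none else ms.getLast?

-- ===== PORT B =====
-- running-max scan: best := None; for identifier, mapped in items: if mapped == cid and (best is None or best < identifier): best := identifier
def latest_correlated_identifier_py_alt (index : List (String × String)) (correlation_id : String) : Option String :=
  index.foldl (fun best p =>
    if p.2 == correlation_id then
      match best with
      | none => some p.1
      | some b => if b < p.1 then some p.1 else some b
    else best) none

-- ===== PRECONDITION & SPEC =====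
def Spec_latest_correlated_identifier_py (index : List (String × String)) (correlation_id : String) (out : Option String) : Prop := out = latest_correlated_identifier_py_alt index correlation_id
instance (index : List (String × String)) (correlation_id : String) (out : Option String) : Decidable (Spec_latest_correlated_identifier_py index correlation_id out) := by unfold Spec_latest_correlated_identifier_py; infer_instance

-- ===== CLAIM (what is proved, stated in full; the proofs are below) =====
def Claim_equal_latest_correlated_identifier_py : Prop := ∀ (index : List (String × String)) (correlation_id : String), Dom_latest_correlated_identifier_py index correlation_id → Spec_latest_correlated_identifier_py index correlation_id (latest_correlated_identifier_py index correlation_id)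

-- ===== LEMMAS AND PROOFS =====

-- the step B applies to each matching identifier
def pvStep (best : Option String) (x : String) : Option String :=
  match best with
  | none => some x
  | some b => if b < x then some x else some b

-- B's fold over the pairs equals folding pvStep over the matching identifiers, in order
theorem pvAlt_eq_fold_keys (index : List (String × String)) (cid : String) (acc : Option String) :
    index.foldl (fun best p =>
      if p.2 == cid then
        match best with
        | none => some p.1
        | some b => if b < p.1 then some p.1 else some b
      else best) acc
    = ((index.filter (fun p => p.2 == cid)).map Prod.fst).foldl pvStep acc := by
  induction index generalizing acc with
  | nil => rfl
  | cons p t ih =>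
      by_cases h : p.2 == cid
      · have hf : List.filter (fun q => q.2 == cid) (p :: t) = p :: List.filter (fun q => q.2 == cid) t :=
          List.filter_cons_of_pos h
        rw [List.foldl_cons, hf, List.map_cons, List.foldl_cons, ih]
        congr 1
        cases acc <;> simp [pvStep, h]
      · have hf : List.filter (fun q => q.2 == cid) (p :: t) = List.filter (fun q => q.2 == cid) t :=
          List.filter_cons_of_neg h
        rw [List.foldl_cons, hf, ih]
        congr 1
        simp [h]

theorem pvStep_some (b x : String) : pvStep (some b) x = some (max b x) := by
  rcases lt_or_ge b x with h | h
  · simp [pvStep, h, max_eq_right h.le]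
  · simp [pvStep, not_lt.mpr h, max_eq_left h]

theorem pvFold_some (ks : List String) (b : String) :
    ks.foldl pvStep (some b) = some (ks.foldl max b) := by
  induction ks generalizing b with
  | nil => rfl
  | cons x t ih => simp [List.foldl_cons, pvStep_some, ih]

theorem pvFoldMax_init_le (t : List String) (b : String) : b ≤ t.foldl max b := by
  induction t generalizing b with
  | nil => simp
  | cons x t ih => exact le_trans (le_max_left b x) (by simpa using ih (max b x))

theorem pvFoldMax_mem (t : List String) (b : String) : t.foldl max b ∈ b :: t := by
  induction t generalizing b with
  | nil => simp
  | cons x t ih =>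
      simp only [List.foldl_cons]
      rcases List.mem_cons.mp (ih (max b x)) with h2 | h2
      · rw [h2]; rcases max_choice b x with h | h <;> simp [h]
      · simp [h2]

theorem pvFoldMax_ub (t : List String) (b : String) : ∀ y ∈ b :: t, y ≤ t.foldl max b := by
  induction t generalizing b with
  | nil => intro y hy; simp at hy; simp [hy]
  | cons x t ih =>
      intro y hy
      simp only [List.foldl_cons]
      rcases List.mem_cons.mp hy with h | h
      · rw [h]; exact le_trans (le_max_left b x) (pvFoldMax_init_le t (max b x))
      · rcases List.mem_cons.mp h with h2 | h2
        · rw [h2]; exact le_trans (le_max_right b x) (pvFoldMax_init_le t (max b x))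
        · exact ih (max b x) y (List.mem_cons_of_mem _ h2)

-- the last element of sorted ks equals the running max of ks
theorem pvSortedLast (ks : List String) :
    (if PySem.List.sorted ks (fun x => x) false = [] then none
     else (PySem.List.sorted ks (fun x => x) false).getLast?) = ks.foldl pvStep none := by
  set s := PySem.List.sorted ks (fun x => x) false with hs
  have hperm : s.Perm ks := PySem.List.sorted_perm ks (fun x => x) false
  cases ks with
  | nil =>
      have : s = [] := by
        have := hperm.length_eq; simpa using List.eq_nil_of_length_eq_zero (by simpa using this)
      simp [this]
  | cons x t =>
      have hne : s ≠ [] := by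
        intro h0
        have := hperm.length_eq
        simp [h0] at this
      rw [if_neg hne, List.getLast?_eq_some_getLast hne]
      have hB : (x :: t).foldl pvStep none = some (t.foldl max x) := by
        simp [List.foldl_cons, pvStep, pvFold_some]
      rw [hB]
      congr 1
      -- both are members of x :: t and upper bounds of x :: t, hence equal
      have hmemA : s.getLast hne ∈ x :: t := hperm.mem_iff.mp (List.getLast_mem hne)
      have hmemB : t.foldl max x ∈ x :: t := pvFoldMax_mem t x
      have hubA : ∀ y ∈ x :: t, y ≤ s.getLast hne := by
        intro y hy
        have hbs : y ∈ s := hperm.mem_iff.mpr hy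
        obtain ⟨i, hi, hbi⟩ := List.getElem_of_mem hbs
        have hlen : 0 < s.length := List.length_pos_iff.mpr hne
        have hmono := PySem.List.sorted_id_getElem_mono (xs := x :: t)
          (p := i) (q := s.length - 1) (by omega) (by simpa [← hs] using (by omega : s.length - 1 < s.length))
        rw [List.getLast_eq_getElem hne]
        simpa [← hs, hbi] using hmono
      exact le_antisymm (pvFoldMax_ub t x _ hmemA) (hubA _ hmemB)

-- ===== VERDICT (by name: the statement is the Claim_ definition above) =====
theorem latest_correlated_identifier_py_spec : Claim_equal_latest_correlated_identifier_py := by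
  intro index cid _
  unfold Spec_latest_correlated_identifier_py latest_correlated_identifier_py latest_correlated_identifier_py_alt
  rw [pvAlt_eq_fold_keys, ← pvSortedLast]
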